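-- pv_equiv track=rewrite | github.com/KelseyKwon/backjoon-programmers | 프로그래머스/2/388352. 비밀 코드 해독/비밀 코드 해독.py | solution
-- ===== SOURCE A (Python) =====
-- from itertools import combinations
--
-- def solution(n, q, ans):
--     answer = 0
--
--     n_list = [i for i in range(1, n+1)]
--     list_comb = list(combinations(n_list, 5))
--     N = len(q)
--
--     # [1, 2, 3, 4, 5]
--     for combs in list_comb:
--         # [1, 2, 3, 4, 5]
--         for i in range(N):
--             # 아래와 같이 하면 순서도, 숫자도 같아야 한다... 그래서 순서가 없는 set으로 해야함!
--             # if (sum(1 for a, b in zip(combs, q[i]) if a != b) != ans[i]):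
--             sums = len(set(combs) & set(q[i]))
--             if sums != ans[i]:
--                 break
--         # 만약에 break에 걸리지 않으면
--         else:
--             answer += 1
--
--
--
--     return answer
-- ===== SOURCE B (Python) =====
-- def solution(n, q, ans):
--     qsets = [set(qi) for qi in q]
--
--     def go(start, k, rem):
--         if k == 0:
--             return 1 if all(r == 0 for r in rem) else 0
--         total = 0
--         for v in range(start, n + 1):
--             total += go(v + 1, k - 1, [r - (v in s) for r, s in zip(rem, qsets)])
--         return total
--
--     return go(1, 5, ans[:len(q)])
-- ===== Notes on version B (the rewrite author's own statement) =====
-- stated objective: alternative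
-- what changed: Replaced the enumerate-all-combinations-and-test loop with depth-5 recursive backtracking: each level loops over the next candidate value and recursion carries per-query remaining-overlap counters (decremented as a value is picked), checking all counters are zero at the leaves; no combination list or per-combination set intersection is ever built.
-- outside the precondition, e.g. on solution(5, [[1, 2, 3], [1]], [0]): A returns 0, B returns 0; on solution(6, [[1, 2, 3, 4, 5]], []): A raises IndexError, B returns 6
import Mathlib
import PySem

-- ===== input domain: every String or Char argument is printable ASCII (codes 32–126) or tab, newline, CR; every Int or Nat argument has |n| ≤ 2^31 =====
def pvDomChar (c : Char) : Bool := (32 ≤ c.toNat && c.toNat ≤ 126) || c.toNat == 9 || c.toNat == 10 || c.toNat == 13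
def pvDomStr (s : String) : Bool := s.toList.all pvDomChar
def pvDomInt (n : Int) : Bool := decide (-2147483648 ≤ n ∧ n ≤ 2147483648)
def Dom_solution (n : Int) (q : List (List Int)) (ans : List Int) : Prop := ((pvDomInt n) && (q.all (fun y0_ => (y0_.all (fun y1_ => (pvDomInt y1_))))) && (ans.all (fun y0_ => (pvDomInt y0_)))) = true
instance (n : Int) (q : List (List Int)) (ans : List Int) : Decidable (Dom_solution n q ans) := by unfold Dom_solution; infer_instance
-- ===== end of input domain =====

-- B replaces A's enumerate-all-5-combinations-and-test loop by an include/exclude backtracking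
-- recursion over the values 1..n that carries per-query remaining overlap counters; same result.

-- itertools.combinations(xs, k) in lexicographic order (library call in Python A)
def pyCombinations (k : Nat) (xs : List Int) : List (List Int) :=
  match k, xs with
  | 0, _ => [[]]
  | _ + 1, [] => []
  | k + 1, x :: rest => (pyCombinations k rest).map (fun c => x :: c) ++ pyCombinations (k + 1) rest

-- len(set(a) & set(b))
def interLen (a b : List Int) : Int :=
  (PySem.Set.inter (PySem.Set.ofList a) (PySem.Set.ofList b)).length

-- ===== PORT A =====
-- inner 'for i in range(N): … break / else' : returns true iff no break fires
def solLoopA (combs : List Int) (q : List (List Int)) (ans : List Int) (i : Nat) : Bool :=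
  if i < q.length then
    let sums := interLen combs (PySem.List.pyGetD q (i : Int) [])
    if sums ≠ PySem.List.pyGetD ans (i : Int) 0 then false
    else solLoopA combs q ans (i + 1)
  else true
termination_by q.length - i

def solution (n : Int) (q : List (List Int)) (ans : List Int) : Int :=
  let n_list := PySem.List.pyRange 1 (n + 1) 1
  let list_comb := pyCombinations 5 n_list
  list_comb.foldl (fun answer combs => if solLoopA combs q ans 0 then answer + 1 else answer) 0

-- ===== PORT B =====
-- def go(start, k, rem): pick the next of k values from start..n, looping over the candidates;
-- rem = remaining overlap needed per query (structural recursion on k, like Python's depth-5 recursion)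
def goB (n : Int) (qsets : List (PySem.Set Int)) (start : Int) (k : Nat) (rem : List Int) : Int :=
  match k with
  | 0 => if rem.all (fun r => r == 0) then 1 else 0
  | k' + 1 =>
    (PySem.List.pyRange start (n + 1) 1).foldl
      (fun total v =>
        total + goB n qsets (v + 1) k'
          (List.zipWith (fun r s => r - (if PySem.Set.contains s v then 1 else 0)) rem qsets)) 0

def solution_alt (n : Int) (q : List (List Int)) (ans : List Int) : Int :=
  let qsets := q.map (fun qi => PySem.Set.ofList qi)
  goB n qsets 1 5 (ans.take q.length)

-- ===== PRECONDITION & SPEC =====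
-- Pre_ excludes inputs with more queries than answers when n ≥ 5: there A raises IndexError reading
-- ans[i] unless every combination is rejected by an answered query (B's truncation ignores the
-- unanswered queries); for n < 5 there are no combinations and ans is never read, so those stay inside.
def Pre_solution (n : Int) (q : List (List Int)) (ans : List Int) : Prop := q.length ≤ ans.length ∨ n < 5
instance (n : Int) (q : List (List Int)) (ans : List Int) : Decidable (Pre_solution n q ans) := by unfold Pre_solution; infer_instance

def pvWitness_solution : Int × List (List Int) × List Int := (6, [[1, 2, 3, 4, 5]], [4])

def Spec_solution (n : Int) (q : List (List Int)) (ans : List Int) (out : Int) : Prop := out = solution_alt n q ans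
instance (n : Int) (q : List (List Int)) (ans : List Int) (out : Int) : Decidable (Spec_solution n q ans out) := by unfold Spec_solution; infer_instance

-- ===== CLAIM (what is proved, stated in full; the proofs are below) =====
def Claim_equal_solution : Prop := ∀ (n : Int) (q : List (List Int)) (ans : List Int), Dom_solution n q ans → Pre_solution n q ans → Spec_solution n q ans (solution n q ans)

-- ===== LEMMAS AND PROOFS =====

-- A's count-loop is countP
theorem foldl_count (p : List Int → Bool) (l : List (List Int)) (acc : Int) :
    l.foldl (fun a c => if p c then a + 1 else a) acc = acc + l.countP p := by
  induction l generalizing acc with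
  | nil => simp
  | cons x xs ih =>
    simp only [List.foldl_cons, List.countP_cons, ih]
    by_cases h : p x <;> simp [h] <;> ring

-- A's inner loop equals the 'all' over the zipped suffix (needs q.length ≤ ans.length)
theorem loopA_eq_all (combs : List Int) (q : List (List Int)) (ans : List Int)
    (hlen : q.length ≤ ans.length) (i : Nat) :
    solLoopA combs q ans i
      = ((q.zip ans).drop i).all (fun p => interLen combs p.1 = p.2) := by
  rw [solLoopA]
  by_cases h : i < q.length
  · have hia : i < ans.length := lt_of_lt_of_le h hlen
    have hz : i < (q.zip ans).length := by simp [List.length_zip]; omega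
    rw [List.drop_eq_getElem_cons hz, List.all_cons]
    have hget : (q.zip ans)[i] = (q[i], ans[i]) := List.getElem_zip
    have h1 : PySem.List.pyGetD q (i : Int) [] = q[i] := by
      rw [PySem.List.pyGetD_natCast]; exact List.getD_eq_getElem q [] h
    have h2 : PySem.List.pyGetD ans (i : Int) 0 = ans[i] := by
      rw [PySem.List.pyGetD_natCast]; exact List.getD_eq_getElem ans 0 hia
    simp only [h, if_true, h1, h2, hget]
    by_cases hc : interLen combs q[i] = ans[i]
    · rw [loopA_eq_all combs q ans hlen (i + 1)]
      simp [hc]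
    · simp [hc]
  · have : (q.zip ans).length ≤ i := by simp [List.length_zip]; omega
    simp [h, List.drop_eq_nil_of_le this]
termination_by q.length - i

-- combinations of too short a list are empty
theorem comb_nil_of_lt (k : Nat) (xs : List Int) (h : xs.length < k) :
    pyCombinations k xs = [] := by
  induction xs generalizing k with
  | nil => cases k with | zero => omega | succ k => rfl
  | cons x rest ih =>
    cases k with
    | zero => omega
    | succ k =>
      have h' : rest.length + 1 < k + 1 := by simpa using h
      rw [pyCombinations, ih k (by omega), ih (k + 1) (by omega)]
      simp

-- every produced combination is a sublist of the pool
theorem comb_sublist (k : Nat) (xs : List Int) (c : List Int)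
    (hc : c ∈ pyCombinations k xs) : c.Sublist xs := by
  induction xs generalizing k c with
  | nil =>
    cases k with
    | zero => simp [pyCombinations] at hc; simp [hc]
    | succ k => simp [pyCombinations] at hc
  | cons x rest ih =>
    cases k with
    | zero => simp [pyCombinations] at hc; simp [hc]
    | succ k =>
      rw [pyCombinations, List.mem_append] at hc
      rcases hc with hc | hc
      · obtain ⟨c', hc', rfl⟩ := List.mem_map.mp hc
        exact List.Sublist.cons₂ x (ih k c' hc')
      · exact List.Sublist.cons x (ih (k + 1) c hc)

theorem interLen_nil (b : List Int) : interLen [] b = 0 := rfl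

theorem interLen_cons (v : Int) (c b : List Int) (hv : v ∉ c) :
    interLen (v :: c) b
      = (if PySem.Set.contains (PySem.Set.ofList b) v then 1 else 0) + interLen c b := by
  unfold interLen
  rw [PySem.Set.ofList_cons]
  have hd : PySem.Set.discard (PySem.Set.ofList c) v = PySem.Set.ofList c := by
    unfold PySem.Set.discard
    apply List.filter_eq_self.mpr
    intro a ha
    have ha' : a ≠ v := fun h => hv (h ▸ (PySem.Set.mem_ofList c a).mp ha)
    simp [ha']
  rw [hd]
  unfold PySem.Set.inter
  rw [List.filter_cons]
  by_cases hx : v ∈ b <;> simp [hx, PySem.Set.mem_ofList] <;> omega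

-- the leaf check: all counters zero ↔ the zipped 'all' (equal lengths)
theorem leaf_all (rem : List Int) (q : List (List Int)) (h : rem.length = q.length) :
    (rem.all (fun r => r == 0))
      = ((rem.zip q).all (fun p => decide (interLen [] p.2 = p.1))) := by
  induction rem generalizing q with
  | nil => simp
  | cons r rs ih =>
    cases q with
    | nil => simp at h
    | cons qh qt =>
      simp only [List.zip_cons_cons, List.all_cons, ih qt (by simpa using h), interLen_nil]
      congr 1
      by_cases hr : r = 0
      · simp [hr]
      · have hr' : ¬(0 : Int) = r := fun h => hr h.symm
        simp [hr, hr']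

-- decrementing the counters shifts the predicate by one picked value v
theorem pred_shift (v : Int) (c : List Int) (hv : v ∉ c) :
    ∀ (rem : List Int) (q : List (List Int)),
    ((List.zipWith (fun r s => r - (if PySem.Set.contains s v then 1 else 0)) rem
        (q.map (fun qi => PySem.Set.ofList qi))).zip q).all
      (fun p => decide (interLen c p.2 = p.1))
    = ((rem.zip q).all (fun p => decide (interLen (v :: c) p.2 = p.1))) := by
  intro rem
  induction rem with
  | nil => intro q; simp
  | cons r rs ih =>
    intro q
    cases q with
    | nil => simp
    | cons qh qt =>
      simp only [List.map_cons, List.zipWith_cons_cons, List.zip_cons_cons, List.all_cons, ih qt]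
      congr 1
      rw [interLen_cons v c qh hv]
      simp only [decide_eq_decide]
      by_cases hx : PySem.Set.contains (PySem.Set.ofList qh) v <;> simp [hx] <;> omega

-- one step of B's candidate loop (head of the range peeled off)
theorem goB_succ_cons (n : Int) (qsets : List (PySem.Set Int)) (start : Int) (k' : Nat)
    (rem : List Int) (hs : start < n + 1) :
    goB n qsets start (k' + 1) rem
      = goB n qsets (start + 1) k'
          (List.zipWith (fun r s => r - (if PySem.Set.contains s start then 1 else 0)) rem qsets)
        + goB n qsets (start + 1) (k' + 1) rem := by
  conv_lhs => rw [goB, PySem.List.pyRange_one_cons hs]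
  rw [List.foldl_cons, PySem.List.foldl_add]
  conv_rhs => rw [goB]
  rw [PySem.List.foldl_add]
  ring

-- main invariant: the backtracking count is A's filtered-combination count over the suffix range
theorem goB_eq (n : Int) (q : List (List Int)) (v : Int) (k : Nat) (rem : List Int)
    (hlen : rem.length = q.length) :
    goB n (q.map (fun qi => PySem.Set.ofList qi)) v k rem
      = (pyCombinations k (PySem.List.pyRange v (n + 1) 1)).countP
          (fun c => (rem.zip q).all (fun p => decide (interLen c p.2 = p.1))) := by
  cases k with
  | zero =>
    rw [goB]
    simp only [pyCombinations, List.countP_cons, List.countP_nil]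
    rw [leaf_all rem q hlen]
    by_cases h : ((rem.zip q).all (fun p => decide (interLen [] p.2 = p.1))) <;> simp [h]
  | succ k' =>
    by_cases hs : v < n + 1
    · rw [goB_succ_cons n _ v k' rem hs]
      rw [PySem.List.pyRange_one_cons hs, pyCombinations, List.countP_append, List.countP_map]
      have hrec1 := goB_eq n q (v + 1) k'
        (List.zipWith (fun r s => r - (if PySem.Set.contains s v then 1 else 0)) rem
          (q.map (fun qi => PySem.Set.ofList qi)))
        (by simp [List.length_zipWith, hlen])
      have hrec2 := goB_eq n q (v + 1) (k' + 1) rem hlen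
      have hA : (pyCombinations k' (PySem.List.pyRange (v + 1) (n + 1) 1)).countP
            (fun c => ((List.zipWith (fun r s => r - (if PySem.Set.contains s v then 1 else 0)) rem
                (q.map (fun qi => PySem.Set.ofList qi))).zip q).all
                  (fun p => decide (interLen c p.2 = p.1)))
          = (pyCombinations k' (PySem.List.pyRange (v + 1) (n + 1) 1)).countP
            ((fun c => (rem.zip q).all (fun p => decide (interLen c p.2 = p.1))) ∘
              (fun c => v :: c)) := by
        apply List.countP_congr
        intro c hc
        have hsub := comb_sublist k' _ c hc
        have hvmem : v ∉ c := by
          intro hvc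
          have := hsub.subset hvc
          rw [PySem.List.mem_pyRange_one] at this
          omega
        exact iff_of_eq (congrArg (· = true) (pred_shift v c hvmem rem q))
      rw [hrec1, hrec2, hA, Nat.cast_add]
    · rw [goB, PySem.List.pyRange_one_eq_nil (by omega),
        comb_nil_of_lt (k' + 1) [] (by simp)]
      simp
termination_by (n + 1 - v).toNat
decreasing_by all_goals omega

-- A's predicate over (q, ans) is B's predicate over (ans.take q.length, q)
theorem pred_take (c : List Int) :
    ∀ (q : List (List Int)) (ans : List Int), q.length ≤ ans.length →
    (((ans.take q.length).zip q).all (fun p => decide (interLen c p.2 = p.1)))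
      = ((q.zip ans).all (fun p => interLen c p.1 = p.2)) := by
  intro q
  induction q with
  | nil => intro ans _; simp
  | cons qh qt ih =>
    intro ans hlen
    cases ans with
    | nil => simp at hlen
    | cons a at' =>
      simp only [List.length_cons, List.take_succ_cons, List.zip_cons_cons, List.all_cons,
        ih at' (by simpa using hlen)]

-- B never reaches a leaf when fewer than k'+1 values remain
theorem goB_zero (n : Int) (qsets : List (PySem.Set Int)) (start : Int) (k' : Nat)
    (rem : List Int) (h : n + 1 - start < (k' : Int) + 1) :
    goB n qsets start (k' + 1) rem = 0 := by
  by_cases hs : start < n + 1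
  · cases k' with
    | zero => omega
    | succ k'' =>
      rw [goB_succ_cons n qsets start (k'' + 1) rem hs,
        goB_zero n qsets (start + 1) k'' _ (by push_cast at h ⊢; omega),
        goB_zero n qsets (start + 1) (k'' + 1) rem (by push_cast at h ⊢; omega)]
      simp
  · rw [goB, PySem.List.pyRange_one_eq_nil (by omega)]
    simp
termination_by (n + 1 - start).toNat
decreasing_by all_goals omega

-- ===== VERDICT (by name: the statement is the Claim_ definition above) =====
theorem solution_spec : Claim_equal_solution := by
  intro n q ans _ hpre
  have hpre2 : q.length ≤ ans.length ∨ n < 5 := hpre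
  simp only [Spec_solution, solution, solution_alt]
  by_cases hpre' : q.length ≤ ans.length
  · rw [foldl_count, zero_add,
      goB_eq n q 1 5 (ans.take q.length) (by simp [List.length_take]; omega)]
    have hcp : (pyCombinations 5 (PySem.List.pyRange 1 (n + 1) 1)).countP
          (fun combs => solLoopA combs q ans 0)
        = (pyCombinations 5 (PySem.List.pyRange 1 (n + 1) 1)).countP
          (fun c => ((ans.take q.length).zip q).all (fun p => decide (interLen c p.2 = p.1))) := by
      apply List.countP_congr
      intro c _
      rw [loopA_eq_all c q ans hpre' 0, List.drop_zero, pred_take c q ans hpre']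
    rw [hcp]
  · have hn : n < 5 := by omega
    rw [foldl_count, zero_add,
      comb_nil_of_lt 5 _ (by rw [PySem.List.length_pyRange_one]; omega),
      goB_zero n _ 1 4 _ (by push_cast; omega)]
    simp
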